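-- pv_equiv track=rewrite | github.com/Thanh25082005/CV_Screen_AI | app/services/search/query_expansion.py | expand_for_skills
-- ===== SOURCE A (Python) =====
-- from typing import List, Optional
--
-- def expand_for_skills(skill: str) -> List[str]:
--     """
--     Expand a skill into related skills.
--
--     Used for skill matching in candidate search.
--
--     Args:
--         skill: Skill to expand (e.g., "Python")
--
--     Returns:
--         Related skills
--     """
--     # Common skill groupings
--     skill_groups = {
--         "python": ["python3", "django", "flask", "fastapi"],
--         "javascript": ["js", "node.js", "react", "vue", "angular"],
--         "java": ["spring", "spring boot", "hibernate"],
--         "sql": ["mysql", "postgresql", "oracle", "sql server"],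
--         "aws": ["amazon web services", "ec2", "s3", "lambda"],
--         "docker": ["container", "kubernetes", "k8s"],
--         "machine learning": ["ml", "deep learning", "ai", "học máy"],
--     }
--
--     skill_lower = skill.lower()
--
--     for key, related in skill_groups.items():
--         if skill_lower == key or skill_lower in related:
--             return [skill] + [s for s in related if s != skill_lower]
--
--     return [skill]
-- ===== SOURCE B (Python) =====
-- from typing import List, Optional
--
-- def expand_for_skills(skill: str) -> List[str]:
--     """Expand a skill via a flattened tagged term table instead of a per-group scan."""
--     skill_groups = {
--         "python": ["python3", "django", "flask", "fastapi"],
--         "javascript": ["js", "node.js", "react", "vue", "angular"],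
--         "java": ["spring", "spring boot", "hibernate"],
--         "sql": ["mysql", "postgresql", "oracle", "sql server"],
--         "aws": ["amazon web services", "ec2", "s3", "lambda"],
--         "docker": ["container", "kubernetes", "k8s"],
--         "machine learning": ["ml", "deep learning", "ai", "học máy"],
--     }
--
--     t = skill.lower()
--
--     # flatten the grouping into one tagged table: (group id, term, is the group key)
--     flat = [(gid, term, is_key)
--             for gid, (key, related) in enumerate(skill_groups.items())
--             for is_key, terms in ((True, (key,)), (False, related))
--             for term in terms]
--
--     # group ids of every table entry matching the lowered skill, in table order
--     hits = [gid for gid, term, _ in flat if term == t]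
--     if not hits:
--         return [skill]
--     g = hits[0]
--
--     # rebuild the answer from the table: related terms of group g, minus the match
--     return [skill] + [term for gid, term, is_key in flat
--                       if gid == g and not is_key and term != t]
-- ===== Notes on version B (the rewrite author's own statement) =====
-- stated objective: alternative
-- what changed: B flattens the grouping into one tagged table of (group id, term, is_key) triples, collects the group ids of entries matching the lowered skill, and rebuilds the answer by filtering that flat table for the first hit's non-key terms, instead of A's per-group scan with an early return of the group's related list.
import Mathlib
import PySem

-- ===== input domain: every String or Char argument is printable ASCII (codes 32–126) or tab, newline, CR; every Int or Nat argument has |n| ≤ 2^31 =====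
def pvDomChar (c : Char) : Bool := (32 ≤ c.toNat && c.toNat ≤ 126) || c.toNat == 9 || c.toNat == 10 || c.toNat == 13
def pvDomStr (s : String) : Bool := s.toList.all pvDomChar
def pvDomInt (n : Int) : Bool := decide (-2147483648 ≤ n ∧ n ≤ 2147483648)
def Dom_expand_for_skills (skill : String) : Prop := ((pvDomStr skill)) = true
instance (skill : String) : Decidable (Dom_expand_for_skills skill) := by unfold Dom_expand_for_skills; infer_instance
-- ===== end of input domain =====

-- B flattens the grouping into one tagged term table and rebuilds the answer by filtering it, instead of A's per-group scan with early return (alternative decomposition, same cost).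


-- the literal skill_groups table (shared data of both Pythons)
def pvGroups : List (String × List String) :=
  [("python", ["python3", "django", "flask", "fastapi"]),
   ("javascript", ["js", "node.js", "react", "vue", "angular"]),
   ("java", ["spring", "spring boot", "hibernate"]),
   ("sql", ["mysql", "postgresql", "oracle", "sql server"]),
   ("aws", ["amazon web services", "ec2", "s3", "lambda"]),
   ("docker", ["container", "kubernetes", "k8s"]),
   ("machine learning", ["ml", "deep learning", "ai", "học máy"])]

-- ===== PORT A =====
-- A's for-loop over the groups with early return, as structural recursion
def pvScanA (skill t : String) : List (String × List String) → List String
  | [] => [skill]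
  | (key, related) :: rest =>
    if t == key || related.contains t then
      [skill] ++ related.filter (fun s => !(s == t))
    else pvScanA skill t rest

def expand_for_skills (skill : String) : List String :=
  pvScanA skill (PySem.Str.lower skill) pvGroups

-- ===== PORT B =====
-- B's flattened tagged table: (group id, term, is the group key), key first then related
def pvFlat : List (Int × String × Bool) :=
  (PySem.List.enumerate pvGroups).flatMap (fun p =>
    [(p.1, p.2.1, true)] ++ p.2.2.map (fun term => (p.1, term, false)))

def expand_for_skills_alt (skill : String) : List String :=
  let t := PySem.Str.lower skill
  let hits := (pvFlat.filter (fun p => p.2.1 == t)).map (fun p => p.1)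
  match hits with
  | [] => [skill]
  | g :: _ =>
    [skill] ++ (pvFlat.filter (fun p => p.1 == g && !p.2.2 && !(p.2.1 == t))).map (fun p => p.2.1)

-- ===== PRECONDITION & SPEC =====
def Spec_expand_for_skills (skill : String) (out : List String) : Prop := out = expand_for_skills_alt skill
instance (skill : String) (out : List String) : Decidable (Spec_expand_for_skills skill out) := by unfold Spec_expand_for_skills; infer_instance

-- ===== CLAIM (what is proved, stated in full; the proofs are below) =====
def Claim_equal_expand_for_skills : Prop := ∀ (skill : String), Dom_expand_for_skills skill → Spec_expand_for_skills skill (expand_for_skills skill)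

-- ===== LEMMAS AND PROOFS =====

-- the trailing part of A's answer (everything after the leading [skill])
def pvTailA (t : String) : List (String × List String) → List String
  | [] => []
  | (key, related) :: rest =>
    if t == key || related.contains t then related.filter (fun s => !(s == t))
    else pvTailA t rest

-- the trailing part of B's answer
def pvTailB (t : String) : List String :=
  match (pvFlat.filter (fun p => p.2.1 == t)).map (fun p => p.1) with
  | [] => []
  | g :: _ => (pvFlat.filter (fun p => p.1 == g && !p.2.2 && !(p.2.1 == t))).map (fun p => p.2.1)

theorem pvScanA_eq_tail (skill t : String) (gs : List (String × List String)) :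
    pvScanA skill t gs = [skill] ++ pvTailA t gs := by
  induction gs with
  | nil => rfl
  | cons g rest ih =>
    obtain ⟨key, related⟩ := g
    simp only [pvScanA, pvTailA]
    split_ifs <;> simp [ih]

theorem pvAlt_eq_tail (skill : String) :
    expand_for_skills_alt skill = [skill] ++ pvTailB (PySem.Str.lower skill) := by
  unfold expand_for_skills_alt pvTailB
  cases h : (pvFlat.filter (fun p => p.2.1 == PySem.Str.lower skill)).map (fun p => p.1) <;>
    simp [h]

-- all terms occurring anywhere in the table
def pvAllTerms : List String :=
  ["python", "python3", "django", "flask", "fastapi",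
   "javascript", "js", "node.js", "react", "vue", "angular",
   "java", "spring", "spring boot", "hibernate",
   "sql", "mysql", "postgresql", "oracle", "sql server",
   "aws", "amazon web services", "ec2", "s3", "lambda",
   "docker", "container", "kubernetes", "k8s",
   "machine learning", "ml", "deep learning", "ai", "học máy"]

theorem pvFlat_terms : ∀ p ∈ pvFlat, p.2.1 ∈ pvAllTerms := by decide

theorem pvGroups_terms : ∀ p ∈ pvGroups, p.1 ∈ pvAllTerms ∧ ∀ s ∈ p.2, s ∈ pvAllTerms := by decide

theorem pvTailA_nil (t : String) (gs : List (String × List String))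
    (h : ∀ p ∈ gs, t ≠ p.1 ∧ t ∉ p.2) : pvTailA t gs = [] := by
  induction gs with
  | nil => rfl
  | cons g rest ih =>
    obtain ⟨key, related⟩ := g
    have hg := h (key, related) (List.mem_cons_self ..)
    simp only [pvTailA]
    rw [if_neg]
    · exact ih (fun p hp => h p (List.mem_cons_of_mem _ hp))
    · simp [hg.1, hg.2]

theorem pvTail_eq (t : String) : pvTailA t pvGroups = pvTailB t := by
  by_cases hmem : t ∈ pvAllTerms
  · fin_cases hmem <;> decide
  · have hB : pvTailB t = [] := by
      unfold pvTailB
      have : pvFlat.filter (fun p => p.2.1 == t) = [] := by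
        rw [List.filter_eq_nil_iff]
        intro p hp
        have := pvFlat_terms p hp
        simp only [beq_iff_eq]
        intro h; exact hmem (h ▸ this)
      simp [this]
    have hA : pvTailA t pvGroups = [] := by
      apply pvTailA_nil
      intro p hp
      have := pvGroups_terms p hp
      exact ⟨fun h => hmem (h ▸ this.1), fun h => hmem (this.2 _ h)⟩
    rw [hA, hB]

-- ===== VERDICT (by name: the statement is the Claim_ definition above) =====
theorem expand_for_skills_spec : Claim_equal_expand_for_skills := by
  intro skill _
  unfold Spec_expand_for_skills expand_for_skills
  rw [pvAlt_eq_tail, pvScanA_eq_tail, pvTail_eq]
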